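-- pv_equiv track=rewrite | github.com/kmk142789/kmk142789 | scripts/generate_pulseforge.py | classify_contract
-- ===== SOURCE A (Python) =====
-- from typing import Iterable, Sequence
--
-- def classify_contract(files: Iterable[str]) -> str:
--     lowered = [path.lower() for path in files]
--     if any("math" in path for path in lowered):
--         return "math"
--     if any("stake" in path for path in lowered):
--         return "staking"
--     if any("govern" in path for path in lowered):
--         return "governance"
--     return "echo-system"
-- ===== SOURCE B (Python) =====
-- def classify_contract(files):
--     has_math = has_stake = has_govern = False
--     for path in files:
--         low = path.lower()
--         if "math" in low:
--             has_math = True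
--         if "stake" in low:
--             has_stake = True
--         if "govern" in low:
--             has_govern = True
--     if has_math:
--         return "math"
--     if has_stake:
--         return "staking"
--     if has_govern:
--         return "governance"
--     return "echo-system"
-- ===== Notes on version B (the rewrite author's own statement) =====
-- stated objective: alternative
-- what changed: Replaces the lowercase-list build plus three separate short-circuiting any-scans with a single accumulating pass that maintains three boolean flags, applying the same priority after the loop.
import Mathlib
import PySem

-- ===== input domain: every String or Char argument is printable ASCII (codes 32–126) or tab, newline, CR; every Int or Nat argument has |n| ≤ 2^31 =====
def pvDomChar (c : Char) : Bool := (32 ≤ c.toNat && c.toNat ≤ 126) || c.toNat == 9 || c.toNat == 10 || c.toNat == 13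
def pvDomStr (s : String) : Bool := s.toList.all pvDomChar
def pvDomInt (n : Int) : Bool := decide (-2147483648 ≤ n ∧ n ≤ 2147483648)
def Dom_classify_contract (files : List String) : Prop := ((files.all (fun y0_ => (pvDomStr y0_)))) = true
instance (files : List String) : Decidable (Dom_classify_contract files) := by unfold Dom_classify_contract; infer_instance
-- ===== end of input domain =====

-- B replaces A's three separate short-circuiting scans with one accumulating pass over the
-- files maintaining three boolean flags (objective: alternative decomposition, same cost).

-- ===== PORT A =====
def classify_contract (files : List String) : String :=
  let lowered := files.map (fun path => PySem.Str.lower path)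
  if lowered.any (fun path => PySem.Str.isIn "math" path) then "math"
  else if lowered.any (fun path => PySem.Str.isIn "stake" path) then "staking"
  else if lowered.any (fun path => PySem.Str.isIn "govern" path) then "governance"
  else "echo-system"

-- ===== PORT B =====
-- one pass: fold the three flags (has_math, has_stake, has_govern) over the files
def classifyStep (st : Bool × Bool × Bool) (path : String) : Bool × Bool × Bool :=
  let low := PySem.Str.lower path
  ((if PySem.Str.isIn "math" low then true else st.1),
   (if PySem.Str.isIn "stake" low then true else st.2.1),
   (if PySem.Str.isIn "govern" low then true else st.2.2))

def classify_contract_alt (files : List String) : String :=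
  let st := files.foldl classifyStep (false, false, false)
  if st.1 then "math"
  else if st.2.1 then "staking"
  else if st.2.2 then "governance"
  else "echo-system"

-- ===== PRECONDITION & SPEC =====
def Spec_classify_contract (files : List String) (out : String) : Prop := out = classify_contract_alt files
instance (files : List String) (out : String) : Decidable (Spec_classify_contract files out) := by unfold Spec_classify_contract; infer_instance

-- ===== CLAIM (what is proved, stated in full; the proofs are below) =====
def Claim_equal_classify_contract : Prop := ∀ (files : List String), Dom_classify_contract files → Spec_classify_contract files (classify_contract files)

-- ===== LEMMAS AND PROOFS =====
theorem classifyStep_foldl (files : List String) (st : Bool × Bool × Bool) :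
    files.foldl classifyStep st =
      (st.1 || files.any (fun p => PySem.Str.isIn "math" (PySem.Str.lower p)),
       st.2.1 || files.any (fun p => PySem.Str.isIn "stake" (PySem.Str.lower p)),
       st.2.2 || files.any (fun p => PySem.Str.isIn "govern" (PySem.Str.lower p))) := by
  induction files generalizing st with
  | nil => simp
  | cons x xs ih =>
    simp only [List.foldl_cons, List.any_cons, ih, classifyStep]
    obtain ⟨a, b, c⟩ := st
    dsimp only
    refine Prod.ext ?_ (Prod.ext ?_ ?_) <;> (split_ifs <;> simp_all)

-- ===== VERDICT (by name: the statement is the Claim_ definition above) =====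
theorem classify_contract_spec : Claim_equal_classify_contract := by
  intro files _
  unfold Spec_classify_contract classify_contract classify_contract_alt
  simp [classifyStep_foldl, List.any_map, Function.comp]
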